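-- pv_equiv track=rewrite | github.com/jaeby99/Practice | algorithm_py/exam.py | solution
-- ===== SOURCE A (Python) =====
-- def solution(answers):
--     list1=[1,2,3,4,5]
--     list2=[2,1,2,3,2,4,2,5]
--     list3=[3,3,1,1,2,2,4,4,5,5]
--     score=[0,0,0]
--     result=[ ]
--
--     for idx, answer in enumerate(answers):
--         if answer==list1[idx%len(list1)]:
--             score[0] += 1
--         if answer==list2[idx%len(list2)]:
--             score[1] += 1
--         if answer==list3[idx%len(list3)]:
--             score[2] += 1
--
--     for idx, x in enumerate(score):
--         if x == max(score):
--             result.append(idx+1)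
--
--     return result
-- ===== SOURCE B (Python) =====
-- def solution(answers):
--     patterns = [[1, 2, 3, 4, 5],
--                 [2, 1, 2, 3, 2, 4, 2, 5],
--                 [3, 3, 1, 1, 2, 2, 4, 4, 5, 5]]
--     # Histogram pass: bucket each answer by (position mod 40, value); 40 = lcm of the
--     # pattern lengths, so each pattern is constant on a residue class mod 40.
--     cnt = {}
--     for i, a in enumerate(answers):
--         key = (i % 40, a)
--         cnt[key] = cnt.get(key, 0) + 1
--     # Each score is read off the 40-entry histogram, independent of len(answers).
--     scores = [sum(cnt.get((r, p[r % len(p)]), 0) for r in range(40))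
--               for p in patterns]
--     best = max(scores)
--     return [k + 1 for k, s in enumerate(scores) if s == best]
-- ===== Notes on version B (the rewrite author's own statement) =====
-- stated objective: alternative
-- what changed: Replaces A's per-element comparison loop (three ifs updating three counters) by a histogram algorithm: one bucketing pass builds a counter keyed by (index mod 40, answer) -- 40 = lcm of the pattern lengths -- and each score is then read off the fixed 40-entry histogram with no further scan of the answers; winner selection is a comprehension over the score list.
import Mathlib
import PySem

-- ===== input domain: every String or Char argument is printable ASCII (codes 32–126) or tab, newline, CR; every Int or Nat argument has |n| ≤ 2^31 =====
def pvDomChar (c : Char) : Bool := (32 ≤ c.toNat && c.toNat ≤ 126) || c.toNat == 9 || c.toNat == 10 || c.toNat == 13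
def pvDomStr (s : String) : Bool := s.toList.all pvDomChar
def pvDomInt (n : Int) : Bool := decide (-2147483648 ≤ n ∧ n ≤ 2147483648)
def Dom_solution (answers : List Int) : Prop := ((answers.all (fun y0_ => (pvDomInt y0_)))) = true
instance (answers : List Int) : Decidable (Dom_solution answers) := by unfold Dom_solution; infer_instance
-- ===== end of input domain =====

-- B replaces A's per-element three-way comparison loop by a histogram algorithm: one pass
-- buckets answers by (index mod 40, value), then each score is read off the fixed 40-entry
-- histogram (objective: alternative).


-- ===== PORT A =====
def solution (answers : List Int) : List Int :=
  let list1 : List Int := [1, 2, 3, 4, 5]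
  let list2 : List Int := [2, 1, 2, 3, 2, 4, 2, 5]
  let list3 : List Int := [3, 3, 1, 1, 2, 2, 4, 4, 5, 5]
  -- score = [0,0,0], kept as a triple; one pass with three ifs, as in A
  let score : Int × Int × Int :=
    (PySem.List.enumerate answers 0).foldl
      (fun s p =>
        let s0 := if p.2 = PySem.List.pyGetD list1 (PySem.Int.mod p.1 (list1.length : Int)) 0 then s.1 + 1 else s.1
        let s1 := if p.2 = PySem.List.pyGetD list2 (PySem.Int.mod p.1 (list2.length : Int)) 0 then s.2.1 + 1 else s.2.1
        let s2 := if p.2 = PySem.List.pyGetD list3 (PySem.Int.mod p.1 (list3.length : Int)) 0 then s.2.2 + 1 else s.2.2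
        (s0, s1, s2))
      (0, 0, 0)
  let scoreL : List Int := [score.1, score.2.1, score.2.2]
  let mx : Int := (PySem.List.max? scoreL (fun y => y)).getD 0   -- max(score); scoreL has 3 elements so max? is some
  (PySem.List.enumerate scoreL 0).foldl
    (fun r p => if p.2 = mx then r ++ [p.1 + 1] else r) []

-- ===== PORT B =====
def solution_alt (answers : List Int) : List Int :=
  let patterns : List (List Int) :=
    [[1, 2, 3, 4, 5], [2, 1, 2, 3, 2, 4, 2, 5], [3, 3, 1, 1, 2, 2, 4, 4, 5, 5]]
  -- bucketing pass: cnt[(i % 40, a)] = cnt.get(key, 0) + 1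
  let cnt : PySem.Dict (Int × Int) Int :=
    (PySem.List.enumerate answers 0).foldl
      (fun d q => d.insert (PySem.Int.mod q.1 40, q.2)
                    (d.getD (PySem.Int.mod q.1 40, q.2) 0 + 1))
      PySem.Dict.empty
  -- scores read off the 40-entry histogram: sum(cnt.get((r, p[r % len(p)]), 0) for r in range(40))
  let scores : List Int := patterns.map (fun p =>
    ((PySem.List.pyRange 0 40 1).map (fun r =>
      cnt.getD (r, PySem.List.pyGetD p (PySem.Int.mod r (p.length : Int)) 0) 0)).sum)
  let best : Int := (PySem.List.max? scores (fun y => y)).getD 0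
  ((PySem.List.enumerate scores 0).filter (fun q => q.2 == best)).map (fun q => q.1 + 1)

-- ===== PRECONDITION & SPEC =====
def Spec_solution (answers : List Int) (out : List Int) : Prop := out = solution_alt answers
instance (answers : List Int) (out : List Int) : Decidable (Spec_solution answers out) := by unfold Spec_solution; infer_instance

-- ===== CLAIM (what is proved, stated in full; the proofs are below) =====
def Claim_equal_solution : Prop := ∀ (answers : List Int), Dom_solution answers → Spec_solution answers (solution answers)

-- ===== LEMMAS AND PROOFS =====

-- per-element hit indicator: does answer p.2 at index p.1 match the cyclic pattern pat
def pvHit (pat : List Int) (p : Int × Int) : Int :=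
  if p.2 = PySem.List.pyGetD pat (PySem.Int.mod p.1 (pat.length : Int)) 0 then 1 else 0

-- bucket key used by B
def pvKey (q : Int × Int) : Int × Int := (PySem.Int.mod q.1 40, q.2)

-- pattern value at residue r
def pvPat (pat : List Int) (r : Int) : Int :=
  PySem.List.pyGetD pat (PySem.Int.mod r (pat.length : Int)) 0

-- A's single fold over the enumerated answers computes, in each component, the hit sums.
theorem pvFold_eq_sums (p1 p2 p3 : List Int) (l : List (Int × Int)) (a b c : Int) :
    l.foldl
      (fun s p =>
        let s0 := if p.2 = PySem.List.pyGetD p1 (PySem.Int.mod p.1 (p1.length : Int)) 0 then s.1 + 1 else s.1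
        let s1 := if p.2 = PySem.List.pyGetD p2 (PySem.Int.mod p.1 (p2.length : Int)) 0 then s.2.1 + 1 else s.2.1
        let s2 := if p.2 = PySem.List.pyGetD p3 (PySem.Int.mod p.1 (p3.length : Int)) 0 then s.2.2 + 1 else s.2.2
        (s0, s1, s2))
      (a, b, c)
    = (a + (l.map (pvHit p1)).sum, b + (l.map (pvHit p2)).sum, c + (l.map (pvHit p3)).sum) := by
  induction l generalizing a b c with
  | nil => simp
  | cons x t ih =>
    simp only [List.foldl_cons, List.map_cons, List.sum_cons, ih, pvHit]
    split_ifs <;> simp <;> omega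

-- B's histogram lookup is a count of bucket keys
theorem pvCnt_getD (l : List (Int × Int)) (k : Int × Int) :
    (l.foldl
        (fun d q => d.insert (PySem.Int.mod q.1 40, q.2)
                      (d.getD (PySem.Int.mod q.1 40, q.2) 0 + 1))
        (PySem.Dict.empty : PySem.Dict (Int × Int) Int)).getD k 0
      = ((l.map pvKey).count k : Int) := by
  have h : (fun (d : PySem.Dict (Int × Int) Int) (q : Int × Int) =>
      d.insert (PySem.Int.mod q.1 40, q.2) (d.getD (PySem.Int.mod q.1 40, q.2) 0 + 1))
      = (fun d q => d.insert (pvKey q) (d.getD (pvKey q) 0 + 1)) := rfl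
  have h2 : List.foldl (fun d q => d.insert (pvKey q) (d.getD (pvKey q) 0 + 1))
      (PySem.Dict.empty : PySem.Dict (Int × Int) Int) l
      = List.foldl (fun d x => d.insert x (d.getD x 0 + 1)) PySem.Dict.empty (l.map pvKey) := by
    rw [List.foldl_map]
  rw [h, h2, PySem.Dict.getD_foldl_insert_add_one]
  simp [PySem.Dict.getD_empty]

-- indicator sum over the residue range picks out exactly the bucket of (x, a)
theorem pvIndicator_sum (f : Int → Int) (x a : Int) (h0 : 0 ≤ x) (h1 : x < 40) :
    ((PySem.List.pyRange 0 40 1).map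
        (fun r => if ((x, a) : Int × Int) = (r, f r) then (1 : Int) else 0)).sum
      = if a = f x then 1 else 0 := by
  by_cases h : a = f x
  · have hfun : (fun r : Int => if ((x, a) : Int × Int) = (r, f r) then (1 : Int) else 0)
        = fun r => if (r == x) = true then 1 else 0 := by
      funext r
      by_cases hr : r = x
      · subst hr; simp [h]
      · have h1 : (((x, a) : Int × Int) = (r, f r)) ↔ False := by
          simp only [Prod.ext_iff, iff_false, not_and]
          intro hxr; exact absurd hxr.symm hr
        simp [h1, hr]
    rw [hfun, PySem.List.sum_map_ite_one_zero]
    have hmem : x ∈ PySem.List.pyRange 0 40 1 := by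
      rw [PySem.List.mem_pyRange_one]; exact ⟨h0, h1⟩
    have : List.countP (fun r => r == x) (PySem.List.pyRange 0 40 1)
        = List.count x (PySem.List.pyRange 0 40 1) := rfl
    rw [this, List.count_eq_one_of_mem (PySem.List.nodup_pyRange_one 0 40) hmem]
    simp [h]
  · have hfun : (fun r : Int => if ((x, a) : Int × Int) = (r, f r) then (1 : Int) else 0)
        = fun _ => (0 : Int) := by
      funext r
      by_cases hr : r = x
      · subst hr; simp [Prod.ext_iff]; intro hax; exact absurd hax h
      · simp only [Prod.ext_iff]
        exact if_neg (fun hp => hr hp.1.symm)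
    rw [hfun]
    simp [h]

-- summing bucket counts along a pattern's residue profile = the per-element hit sum
theorem pvHistoScore (f : Int → Int) (l : List (Int × Int)) :
    ((PySem.List.pyRange 0 40 1).map
        (fun r => ((l.map pvKey).count (r, f r) : Int))).sum
      = (l.map (fun q => if q.2 = f (PySem.Int.mod q.1 40) then (1 : Int) else 0)).sum := by
  induction l with
  | nil => simp
  | cons q t ih =>
    simp only [List.map_cons, List.sum_cons, List.count_cons]
    have hsplit : (fun r : Int => (((t.map pvKey).count (r, f r)
          + if pvKey q == (r, f r) then 1 else 0 : Nat) : Int))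
        = fun r => (((t.map pvKey).count (r, f r) : Int)
          + if ((PySem.Int.mod q.1 40, q.2) : Int × Int) = (r, f r) then (1 : Int) else 0) := by
      funext r
      push_cast
      simp [pvKey]
    rw [hsplit, PySem.List.sum_map_add_int, ih,
        pvIndicator_sum f (PySem.Int.mod q.1 40) q.2
          (PySem.Int.mod_nonneg q.1 (by norm_num))
          (PySem.Int.mod_lt q.1 (by norm_num))]
    ring

-- mod through the lcm: (i % 40) % b = i % b when 0 < b ∣ 40
theorem pvModMod (i b : Int) (hb : 0 < b) (hd : b ∣ 40) :
    PySem.Int.mod (PySem.Int.mod i 40) b = PySem.Int.mod i b := by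
  rw [PySem.Int.mod_eq_emod_of_pos hb, PySem.Int.mod_eq_emod_of_pos (by norm_num : (0:Int) < 40),
      PySem.Int.mod_eq_emod_of_pos hb, Int.emod_emod_of_dvd _ hd]

-- B's score for one pattern equals the hit sum, for each concrete pattern length
theorem pvScore_eq (pat : List Int) (answers : List Int)
    (hb : 0 < (pat.length : Int)) (hd : (pat.length : Int) ∣ 40) :
    ((PySem.List.pyRange 0 40 1).map (fun r =>
        ((PySem.List.enumerate answers 0).foldl
            (fun d q => d.insert (PySem.Int.mod q.1 40, q.2)
                          (d.getD (PySem.Int.mod q.1 40, q.2) 0 + 1))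
            (PySem.Dict.empty : PySem.Dict (Int × Int) Int)).getD
          (r, PySem.List.pyGetD pat (PySem.Int.mod r (pat.length : Int)) 0) 0)).sum
      = ((PySem.List.enumerate answers 0).map (pvHit pat)).sum := by
  simp only [pvCnt_getD]
  have h := pvHistoScore (pvPat pat) (PySem.List.enumerate answers 0)
  simp only [pvPat] at h
  rw [h]
  congr 1
  apply List.map_congr_left
  intro q _
  simp only [pvHit, pvModMod q.1 (pat.length : Int) hb hd]

-- ===== VERDICT (by name: the statement is the Claim_ definition above) =====
theorem solution_spec : Claim_equal_solution := by
  intro answers _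
  unfold Spec_solution solution solution_alt
  simp only [List.map_cons, List.map_nil]
  rw [pvFold_eq_sums]
  rw [pvScore_eq [1,2,3,4,5] answers (by norm_num) (by norm_num),
      pvScore_eq [2,1,2,3,2,4,2,5] answers (by norm_num) (by norm_num),
      pvScore_eq [3,3,1,1,2,2,4,4,5,5] answers (by norm_num) (by norm_num)]
  simp only [Int.zero_add]
  set c1 := ((PySem.List.enumerate answers 0).map (pvHit [1,2,3,4,5])).sum
  set c2 := ((PySem.List.enumerate answers 0).map (pvHit [2,1,2,3,2,4,2,5])).sum
  set c3 := ((PySem.List.enumerate answers 0).map (pvHit [3,3,1,1,2,2,4,4,5,5])).sum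
  simp only [PySem.List.enumerate_cons, PySem.List.enumerate_nil, List.foldl_cons,
    List.foldl_nil, List.filter_cons, List.filter_nil, beq_iff_eq]
  generalize (PySem.List.max? [c1, c2, c3] fun y => y).getD 0 = m
  split_ifs <;> norm_num
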